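-- pv_equiv track=rewrite | github.com/YoshihiroMatsuguma/- | build_moves_cover_test.py | build_top_with_size
-- ===== SOURCE A (Python) =====
-- def build_top_with_size(a, b, c):
--     """
--     各マスについて (player, size) を返す
--     size: 3=Large, 2=Medium, 1=Small, 0=empty
--     """
--     top = [(0, 0)] * 9
--     for i in range(9):
--         if a[i] != 0:
--             top[i] = (a[i], 3)
--         elif b[i] != 0:
--             top[i] = (b[i], 2)
--         elif c[i] != 0:
--             top[i] = (c[i], 1)
--     return top
-- ===== SOURCE B (Python) =====
-- def build_top_with_size(a, b, c):
--     """
--     各マスについて (player, size) を返す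
--     size: 3=Large, 2=Medium, 1=Small, 0=empty
--     """
--     def cell(i):
--         return (a[i], 3) if a[i] != 0 else (b[i], 2) if b[i] != 0 else (c[i], 1) if c[i] != 0 else (0, 0)
--
--     def go(i):
--         return [] if i == 9 else [cell(i)] + go(i + 1)
--
--     return go(0)
-- ===== Notes on version B (the rewrite author's own statement) =====
-- stated objective: alternative
-- what changed: A's preallocated 9-slot list mutated in an index loop with an elif chain is replaced by a pure recursive builder that conses per-cell values (computed by a conditional-expression helper) front-to-back, with no preallocation or in-place mutation.
import Mathlib
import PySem

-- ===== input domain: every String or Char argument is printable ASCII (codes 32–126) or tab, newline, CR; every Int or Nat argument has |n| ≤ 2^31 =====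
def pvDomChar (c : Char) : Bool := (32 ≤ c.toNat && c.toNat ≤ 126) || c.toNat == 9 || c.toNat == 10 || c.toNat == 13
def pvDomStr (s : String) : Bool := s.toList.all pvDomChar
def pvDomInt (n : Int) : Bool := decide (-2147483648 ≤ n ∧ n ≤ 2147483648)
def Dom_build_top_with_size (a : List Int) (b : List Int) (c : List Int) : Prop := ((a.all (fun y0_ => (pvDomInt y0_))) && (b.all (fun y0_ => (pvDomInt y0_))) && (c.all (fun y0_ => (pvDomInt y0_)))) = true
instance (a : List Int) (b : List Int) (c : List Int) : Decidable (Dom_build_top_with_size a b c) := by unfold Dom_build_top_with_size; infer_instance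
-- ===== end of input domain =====

-- B builds the board purely: a recursive builder conses per-cell values (a conditional-expression
-- helper with A's lazy read order) instead of A's index loop mutating a preallocated list.


-- ===== PORT A =====
def build_top_with_size (a : List Int) (b : List Int) (c : List Int) : List (Int × Int) :=
  (PySem.List.pyRange 0 9 1).foldl (fun top i =>
    match PySem.List.pyGet? a i with
    | none => top
    | some ai =>
      if ai ≠ 0 then PySem.List.pySetD top i (ai, 3)
      else
        match PySem.List.pyGet? b i with
        | none => top
        | some bi =>
          if bi ≠ 0 then PySem.List.pySetD top i (bi, 2)
          else
            match PySem.List.pyGet? c i with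
            | none => top
            | some ci =>
              if ci ≠ 0 then PySem.List.pySetD top i (ci, 1) else top)
    (List.replicate 9 ((0 : Int), (0 : Int)))

-- ===== PORT B =====
-- Source B's `cell(i)`: the conditional expression, reads made total via pyGet?
-- ((0,0) on an out-of-range read never happens inside Pre_, where Python would raise)
def cellB (a : List Int) (b : List Int) (c : List Int) (i : Nat) : Int × Int :=
  match PySem.List.pyGet? a (i : Int) with
  | none => (0, 0)
  | some ai =>
    if ai ≠ 0 then (ai, 3)
    else
      match PySem.List.pyGet? b (i : Int) with
      | none => (0, 0)
      | some bi =>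
        if bi ≠ 0 then (bi, 2)
        else
          match PySem.List.pyGet? c (i : Int) with
          | none => (0, 0)
          | some ci => if ci ≠ 0 then (ci, 1) else (0, 0)

-- Source B's `go(i)`: recursive cons of cells
def goB (a : List Int) (b : List Int) (c : List Int) (i : Nat) : List (Int × Int) :=
  if i = 9 then [] else
    if _h : i < 9 then cellB a b c i :: goB a b c (i + 1) else []
  termination_by 9 - i

def build_top_with_size_alt (a : List Int) (b : List Int) (c : List Int) : List (Int × Int) :=
  goB a b c 0

-- ===== PRECONDITION & SPEC =====
-- Pre_ is exactly where Python A returns: a[i] is read for every i < 9, b[i] only when a[i] == 0,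
-- and c[i] only when also b[i] == 0; B performs exactly the same reads, so both raise outside Pre_.
def Pre_build_top_with_size (a : List Int) (b : List Int) (c : List Int) : Prop :=
  9 ≤ a.length ∧ ∀ i : Nat, i < 9 → a.getD i 0 = 0 →
    i < b.length ∧ (b.getD i 0 = 0 → i < c.length)
instance (a : List Int) (b : List Int) (c : List Int) : Decidable (Pre_build_top_with_size a b c) := by
  unfold Pre_build_top_with_size; infer_instance
def pvWitness_build_top_with_size : List Int × List Int × List Int :=
  ([1, 0, -1, 0, 0, 1, 0, 0, 0], [0, 2, 0, 0, 0, 0, 0, 1, 0], [0, 0, 0, -1, 0, 0, 0, 2, 1])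
def Spec_build_top_with_size (a : List Int) (b : List Int) (c : List Int) (out : List (Int × Int)) : Prop := out = build_top_with_size_alt a b c
instance (a : List Int) (b : List Int) (c : List Int) (out : List (Int × Int)) : Decidable (Spec_build_top_with_size a b c out) := by unfold Spec_build_top_with_size; infer_instance

-- ===== CLAIM (what is proved, stated in full; the proofs are below) =====
def Claim_equal_build_top_with_size : Prop := ∀ (a : List Int) (b : List Int) (c : List Int), Dom_build_top_with_size a b c → Pre_build_top_with_size a b c → Spec_build_top_with_size a b c (build_top_with_size a b c)

-- ===== LEMMAS AND PROOFS =====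

theorem set_getD_self {α : Type} (l : List α) (n : Nat) (d : α) : l.set n (l.getD n d) = l := by
  by_cases h : n < l.length
  · rw [List.getD_eq_getElem l d h]; exact List.set_getElem_self ..
  · rw [List.set_eq_of_length_le (by omega)]

theorem getD_set {α : Type} (t : List α) (k j : Nat) (v d : α) (hk : k < t.length) :
    (t.set k v).getD j d = if k = j then v else t.getD j d := by
  simp [List.getD_eq_getElem?_getD, List.getElem?_set]
  split_ifs with h
  · subst h; simp
  · rfl

theorem pySetD_nat {α : Type} (t : List α) (k : Nat) (v : α) (h : k < t.length) :
    PySem.List.pySetD t (k : Int) v = t.set k v := by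
  simp [PySem.List.pySetD, PySem.List.pySet?, PySem.List.pyIdx?, h]

theorem pyGet?_nat_of_lt {α : Type} (l : List α) (k : Nat) (d : α) (h : k < l.length) :
    PySem.List.pyGet? l (k : Int) = some (l.getD k d) := by
  rw [PySem.List.pyGet?_natCast, List.getElem?_eq_getElem h, List.getD_eq_getElem l d h]

-- per-cell semantics of A's elif chain
def fChain (a b c : List Int) (k : Nat) (old : Int × Int) : Int × Int :=
  if a.getD k 0 ≠ 0 then (a.getD k 0, 3)
  else if b.getD k 0 ≠ 0 then (b.getD k 0, 2)
  else if c.getD k 0 ≠ 0 then (c.getD k 0, 1)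
  else old

-- a foldl over range(9) whose step sets cell k to f k (old value) maps every cell j to f j
theorem foldl_step_spec {α : Type} (d : α) (f : Nat → α → α) (step : List α → Int → List α)
    (hstep : ∀ (t : List α) (k : Nat), t.length = 9 → k < 9 → step t (k : Int) = t.set k (f k (t.getD k d))) :
    ∀ (n : Nat), n ≤ 9 → ∀ (t : List α), t.length = 9 →
      (((List.range' (9 - n) n).map (fun k => ((k : Nat) : Int))).foldl step t).length = 9 ∧
      ∀ j : Nat, j < 9 →
        (((List.range' (9 - n) n).map (fun k => ((k : Nat) : Int))).foldl step t).getD j d =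
          if 9 - n ≤ j then f j (t.getD j d) else t.getD j d := by
  intro n
  induction n with
  | zero =>
    intro _ t ht
    refine ⟨by simpa using ht, fun j hj => ?_⟩
    rw [if_neg (by omega)]; simp
  | succ n ih =>
    intro hn t ht
    have hr : List.range' (9 - (n+1)) (n+1) = (9 - (n+1)) :: List.range' (9 - n) n := by
      have h9 : 9 - (n+1) + 1 = 9 - n := by omega
      rw [List.range'_succ, h9]
    rw [hr]
    simp only [List.map_cons, List.foldl_cons]
    rw [hstep t (9 - (n+1)) ht (by omega)]
    have ht' : (t.set (9 - (n+1)) (f (9 - (n+1)) (t.getD (9 - (n+1)) d))).length = 9 := by simp [ht]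
    obtain ⟨hlen, hget⟩ := ih (by omega) _ ht'
    refine ⟨hlen, fun j hj => ?_⟩
    rw [hget j hj, getD_set _ _ _ _ _ (by omega)]
    split_ifs <;> first | rfl | omega | simp_all

theorem pyRange_nine : PySem.List.pyRange 0 9 1 = (List.range' 0 9).map (fun k => ((k : Nat) : Int)) := by
  decide

theorem buildA_spec (a b c : List Int) (ha : 9 ≤ a.length)
    (hch : ∀ i : Nat, i < 9 → a.getD i 0 = 0 → i < b.length ∧ (b.getD i 0 = 0 → i < c.length)) :
    (build_top_with_size a b c).length = 9 ∧
    ∀ j : Nat, j < 9 → (build_top_with_size a b c).getD j (0, 0) =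
      fChain a b c j ((0, 0) : Int × Int) := by
  have hstep : ∀ (u : List (Int × Int)) (k : Nat), u.length = 9 → k < 9 →
      (match PySem.List.pyGet? a (k : Int) with
        | none => u
        | some ai =>
          if ai ≠ 0 then PySem.List.pySetD u (k : Int) (ai, 3)
          else
            match PySem.List.pyGet? b (k : Int) with
            | none => u
            | some bi =>
              if bi ≠ 0 then PySem.List.pySetD u (k : Int) (bi, 2)
              else
                match PySem.List.pyGet? c (k : Int) with
                | none => u
                | some ci =>
                  if ci ≠ 0 then PySem.List.pySetD u (k : Int) (ci, 1) else u) =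
      u.set k (fChain a b c k (u.getD k (0, 0))) := by
    intro u k hu hk
    have hsetD : ∀ v : Int × Int, PySem.List.pySetD u (k : Int) v = u.set k v :=
      fun v => pySetD_nat _ _ _ (by omega)
    rw [pyGet?_nat_of_lt a k 0 (by omega)]
    dsimp only
    simp only [fChain]
    by_cases ha0 : a.getD k 0 = 0
    · rw [if_neg (not_not_intro ha0), if_neg (not_not_intro ha0)]
      obtain ⟨hbl, hcc⟩ := hch k hk ha0
      rw [pyGet?_nat_of_lt b k 0 hbl]
      dsimp only
      by_cases hb0 : b.getD k 0 = 0
      · rw [if_neg (not_not_intro hb0), if_neg (not_not_intro hb0),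
          pyGet?_nat_of_lt c k 0 (hcc hb0)]
        dsimp only
        by_cases hc0 : c.getD k 0 = 0
        · rw [if_neg (not_not_intro hc0), if_neg (not_not_intro hc0), set_getD_self]
        · rw [if_pos hc0, if_pos hc0, hsetD]
      · rw [if_pos hb0, if_pos hb0, hsetD]
    · rw [if_pos ha0, if_pos ha0, hsetD]
  have hrep : (List.replicate 9 ((0 : Int), (0 : Int))).length = 9 := by simp
  have := foldl_step_spec (0, 0) (fChain a b c)
    (fun u (i : Int) =>
      match PySem.List.pyGet? a i with
      | none => u
      | some ai =>
        if ai ≠ 0 then PySem.List.pySetD u i (ai, 3)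
        else
          match PySem.List.pyGet? b i with
          | none => u
          | some bi =>
            if bi ≠ 0 then PySem.List.pySetD u i (bi, 2)
            else
              match PySem.List.pyGet? c i with
              | none => u
              | some ci =>
                if ci ≠ 0 then PySem.List.pySetD u i (ci, 1) else u)
    hstep 9 (le_refl 9)
    (List.replicate 9 ((0, 0) : Int × Int)) hrep
  obtain ⟨h1, h2⟩ := this
  constructor
  · simpa [build_top_with_size, pyRange_nine] using h1
  · intro j hj
    have h := h2 j hj
    rw [if_pos (by omega)] at h
    have hrepD : (List.replicate 9 ((0, 0) : Int × Int)).getD j (0, 0) = (0, 0) := by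
      rw [List.getD_eq_getElem _ _ (by simpa using hj), List.getElem_replicate]
    rw [hrepD] at h
    simp only [build_top_with_size, pyRange_nine]
    exact h

-- B's recursive builder produces the map of cellB over the remaining indices
theorem goB_eq_map (a b c : List Int) :
    ∀ (n i : Nat), i + n = 9 → goB a b c i = (List.range' i n).map (cellB a b c) := by
  intro n
  induction n with
  | zero => intro i hi; rw [goB]; simp [show i = 9 by omega]
  | succ n ih =>
    intro i hi
    rw [goB, if_neg (by omega), dif_pos (by omega), List.range'_succ, List.map_cons,
      ih (i + 1) (by omega)]

-- under Pre_, cellB's reads succeed and compute exactly A's per-cell chain value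
theorem cellB_eq_fChain (a b c : List Int) (ha : 9 ≤ a.length)
    (hch : ∀ i : Nat, i < 9 → a.getD i 0 = 0 → i < b.length ∧ (b.getD i 0 = 0 → i < c.length))
    (k : Nat) (hk : k < 9) : cellB a b c k = fChain a b c k ((0, 0) : Int × Int) := by
  have hA : PySem.List.pyGet? a (k : Int) = some (a.getD k 0) := pyGet?_nat_of_lt a k 0 (by omega)
  by_cases ha0 : a.getD k 0 = 0
  · obtain ⟨hbl, hcc⟩ := hch k hk ha0
    have hB : PySem.List.pyGet? b (k : Int) = some (b.getD k 0) := pyGet?_nat_of_lt b k 0 hbl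
    by_cases hb0 : b.getD k 0 = 0
    · have hC : PySem.List.pyGet? c (k : Int) = some (c.getD k 0) := pyGet?_nat_of_lt c k 0 (hcc hb0)
      simp only [cellB, fChain, hA, hB, hC]
    · simp only [cellB, fChain, hA, hB]
      generalize hx : a.getD k 0 = x at ha0 ⊢
      generalize hy : b.getD k 0 = y at hb0 ⊢
      simp [ha0, hb0]
  · simp only [cellB, fChain, hA]
    generalize hx : a.getD k 0 = x at ha0 ⊢
    simp [ha0]

-- ===== VERDICT (by name: the statement is the Claim_ definition above) =====
theorem build_top_with_size_spec : Claim_equal_build_top_with_size := by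
  intro a b c _ hpre
  obtain ⟨ha, hch⟩ := hpre
  show build_top_with_size a b c = build_top_with_size_alt a b c
  obtain ⟨hAl, hAg⟩ := buildA_spec a b c ha hch
  have halt : build_top_with_size_alt a b c = (List.range' 0 9).map (cellB a b c) :=
    goB_eq_map a b c 9 0 rfl
  apply List.ext_getElem
  · rw [hAl, halt]; simp
  · intro j hj1 hj2
    have hj : j < 9 := by omega
    rw [← List.getD_eq_getElem _ ((0,0) : Int × Int) hj1, hAg j hj]
    simp only [halt, List.getElem_map, List.getElem_range']
    rw [cellB_eq_fChain a b c ha hch _ (by omega)]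
    norm_num
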